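-- pv_equiv track=rewrite | github.com/cnat-maker-ifrn/rcb-challenge-2025 | mestre/z_robo_mestre.py | min_max_canal
-- ===== SOURCE A (Python) =====
-- def min_max_canal(lista, index):
--     menor = lista[0][index]
--     for i in range(len(lista)):
--         if menor > lista[i][index]:
--             menor = lista[i][index]
--
--     maior = lista[0][index]
--     for i in range(len(lista)):
--         if lista[i][index] > maior:
--             maior = lista[i][index]
--
--     return menor, maior
-- ===== SOURCE B (Python) =====
-- def min_max_canal(lista, index):
--     col = sorted(linha[index] for linha in lista)
--     return col[0], col[-1]
-- ===== Notes on version B (the rewrite author's own statement) =====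
-- stated objective: alternative
-- what changed: Replaces A's two comparison scans over the rows with extracting the column, sorting it once, and returning the first and last elements of the sorted column.
import Mathlib
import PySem

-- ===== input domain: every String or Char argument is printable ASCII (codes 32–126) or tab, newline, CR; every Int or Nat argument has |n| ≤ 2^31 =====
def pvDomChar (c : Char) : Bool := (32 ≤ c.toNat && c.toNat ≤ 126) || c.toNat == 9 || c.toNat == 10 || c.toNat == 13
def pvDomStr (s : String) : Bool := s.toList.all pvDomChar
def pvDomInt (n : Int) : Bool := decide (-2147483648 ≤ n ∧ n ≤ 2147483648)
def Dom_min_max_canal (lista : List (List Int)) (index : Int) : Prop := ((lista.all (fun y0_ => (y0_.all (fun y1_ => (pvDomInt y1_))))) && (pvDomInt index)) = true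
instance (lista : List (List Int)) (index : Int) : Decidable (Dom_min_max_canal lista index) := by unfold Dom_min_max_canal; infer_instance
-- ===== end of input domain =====

-- B extracts the column, sorts it once, and returns its first and last elements,
-- instead of A's two comparison scans over the rows (alternative algorithm, not claimed faster).


-- ===== PORT A =====
-- linha[index] (total under Pre_, which guarantees the index is in range in every row)
def pvCell (index : Int) (row : List Int) : Int := (PySem.List.pyGet? row index).getD 0

def min_max_canal (lista : List (List Int)) (index : Int) : Int × Int :=
  let first := pvCell index ((PySem.List.pyGet? lista 0).getD [])
  let menor := lista.foldl (fun menor row =>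
    if menor > pvCell index row then pvCell index row else menor) first
  let maior := lista.foldl (fun maior row =>
    if pvCell index row > maior then pvCell index row else maior) first
  (menor, maior)

-- ===== PORT B =====
def min_max_canal_alt (lista : List (List Int)) (index : Int) : Int × Int :=
  let col := PySem.List.sorted (lista.map (fun linha => pvCell index linha)) (fun x => x) false
  ((PySem.List.pyGet? col 0).getD 0, (PySem.List.pyGet? col (-1)).getD 0)

-- ===== PRECONDITION & SPEC =====
-- Pre_ excludes exactly the inputs where the Python A raises IndexError:
-- an empty lista, or some row in which index is out of range.
def Pre_min_max_canal (lista : List (List Int)) (index : Int) : Prop :=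
  lista ≠ [] ∧ ∀ row ∈ lista, PySem.Raise.InRange row.length index
instance (lista : List (List Int)) (index : Int) : Decidable (Pre_min_max_canal lista index) := by unfold Pre_min_max_canal; infer_instance

def pvWitness_min_max_canal : List (List Int) × Int := ([[3, 7], [5, 1], [4, 9]], 1)

def Spec_min_max_canal (lista : List (List Int)) (index : Int) (out : Int × Int) : Prop := out = min_max_canal_alt lista index
instance (lista : List (List Int)) (index : Int) (out : Int × Int) : Decidable (Spec_min_max_canal lista index out) := by unfold Spec_min_max_canal; infer_instance

-- ===== CLAIM (what is proved, stated in full; the proofs are below) =====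
def Claim_equal_min_max_canal : Prop := ∀ (lista : List (List Int)) (index : Int), Dom_min_max_canal lista index → Pre_min_max_canal lista index → Spec_min_max_canal lista index (min_max_canal lista index)

-- ===== LEMMAS AND PROOFS =====

-- A's min-fold: its result is the initial value or a mapped element, and a lower bound of both.
theorem pvFoldMin (f : List Int → Int) (l : List (List Int)) (a : Int) :
    (l.foldl (fun m r => if m > f r then f r else m) a = a ∨
      l.foldl (fun m r => if m > f r then f r else m) a ∈ l.map f) ∧
    l.foldl (fun m r => if m > f r then f r else m) a ≤ a ∧
    ∀ y ∈ l.map f, l.foldl (fun m r => if m > f r then f r else m) a ≤ y := by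
  induction l generalizing a with
  | nil => simp
  | cons x xs ih =>
    obtain ⟨hmem, hle, hall⟩ := ih (if a > f x then f x else a)
    constructor
    · rcases hmem with h | h
      · simp only [List.foldl, List.map, h]
        split_ifs with hc
        · exact Or.inr (List.mem_cons_self ..)
        · exact Or.inl rfl
      · exact Or.inr (List.mem_cons_of_mem _ h)
    · constructor
      · refine le_trans hle ?_
        split_ifs with hc <;> omega
      · intro y hy
        rcases List.mem_cons.mp hy with rfl | hy
        · refine le_trans hle ?_
          split_ifs with hc <;> omega
        · exact hall y hy

-- A's max-fold: its result is the initial value or a mapped element, and an upper bound of both.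
theorem pvFoldMax (f : List Int → Int) (l : List (List Int)) (a : Int) :
    (l.foldl (fun m r => if f r > m then f r else m) a = a ∨
      l.foldl (fun m r => if f r > m then f r else m) a ∈ l.map f) ∧
    a ≤ l.foldl (fun m r => if f r > m then f r else m) a ∧
    ∀ y ∈ l.map f, y ≤ l.foldl (fun m r => if f r > m then f r else m) a := by
  induction l generalizing a with
  | nil => simp
  | cons x xs ih =>
    obtain ⟨hmem, hle, hall⟩ := ih (if f x > a then f x else a)
    constructor
    · rcases hmem with h | h
      · simp only [List.foldl, List.map, h]
        split_ifs with hc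
        · exact Or.inr (List.mem_cons_self ..)
        · exact Or.inl rfl
      · exact Or.inr (List.mem_cons_of_mem _ h)
    · constructor
      · refine le_trans ?_ hle
        split_ifs with hc <;> omega
      · intro y hy
        rcases List.mem_cons.mp hy with rfl | hy
        · refine le_trans ?_ hle
          split_ifs with hc <;> omega
        · exact hall y hy

-- in a ≤-pairwise list every element is at most the last one
theorem pvPairwiseLeGetLast (l : List Int) (hp : l.Pairwise (· ≤ ·)) (h : l ≠ []) :
    ∀ y ∈ l, y ≤ l.getLast h := by
  induction l with
  | nil => exact absurd rfl h
  | cons x xs ih =>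
    intro y hy
    rcases List.mem_cons.mp hy with rfl | hy
    · cases xs with
      | nil => simp
      | cons z zs =>
        have hz := (List.pairwise_cons.mp hp).1
        have := ih (List.pairwise_cons.mp hp).2 (by simp) z (by simp)
        rw [List.getLast_cons (by simp)]
        exact le_trans (hz z (by simp)) this
    · cases xs with
      | nil => simp at hy
      | cons z zs =>
        rw [List.getLast_cons (by simp)]
        exact ih (List.pairwise_cons.mp hp).2 (by simp) y hy

-- ===== VERDICT (by name: the statement is the Claim_ definition above) =====
theorem min_max_canal_spec : Claim_equal_min_max_canal := by
  intro lista index _ hpre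
  obtain ⟨hne, _⟩ := hpre
  obtain ⟨r0, rest, rfl⟩ := List.exists_cons_of_ne_nil hne
  unfold Spec_min_max_canal min_max_canal min_max_canal_alt
  simp only []
  set f : List Int → Int := fun linha => pvCell index linha with hf
  set xs : List Int := (r0 :: rest).map f with hxs
  have hxne : xs ≠ [] := by simp [hxs]
  have hfirst : pvCell index ((PySem.List.pyGet? (r0 :: rest) 0).getD []) = f r0 := by
    simp [hf]
  have hfmem : f r0 ∈ xs := by simp [hxs]
  set col : List Int := PySem.List.sorted xs (fun x => x) false with hcol
  have hcne : col ≠ [] := by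
    rw [hcol, Ne, PySem.List.sorted_eq_nil_iff]; exact hxne
  obtain ⟨h0, t, hcons⟩ := List.exists_cons_of_ne_nil hcne
  have hperm : col.Perm xs := PySem.List.sorted_perm ..
  have hpw : col.Pairwise (· ≤ ·) := PySem.List.sorted_pairwise ..
  -- head of col is a lower bound and a member of xs
  have hhmem : h0 ∈ xs := hperm.mem_iff.mp (by rw [hcons]; simp)
  have hhle : ∀ y ∈ xs, h0 ≤ y := by
    have h1 : PySem.List.sorted xs (fun x => x) false = h0 :: t := by
      rw [← hcol]; exact hcons
    have := PySem.List.key_head_sorted_le _ _ h1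
    simpa using this
  -- last of col is an upper bound and a member of xs
  have hlmem : col.getLast hcne ∈ xs := hperm.mem_iff.mp (List.getLast_mem hcne)
  have hlge : ∀ y ∈ xs, y ≤ col.getLast hcne := fun y hy =>
    pvPairwiseLeGetLast col hpw hcne y (hperm.mem_iff.mpr hy)
  -- A's two folds equal head and last of the sorted column
  obtain ⟨hm_mem, hm_le, hm_all⟩ := pvFoldMin f (r0 :: rest) (f r0)
  obtain ⟨hM_mem, hM_le, hM_all⟩ := pvFoldMax f (r0 :: rest) (f r0)
  have hm_in : (r0 :: rest).foldl (fun m r => if m > f r then f r else m) (f r0) ∈ xs := by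
    rcases hm_mem with h | h
    · rw [h]; exact hfmem
    · rw [hxs]; exact h
  have hM_in : (r0 :: rest).foldl (fun m r => if f r > m then f r else m) (f r0) ∈ xs := by
    rcases hM_mem with h | h
    · rw [h]; exact hfmem
    · rw [hxs]; exact h
  have hmin : (r0 :: rest).foldl (fun m r => if m > f r then f r else m) (f r0) = h0 :=
    le_antisymm (hm_all _ (hxs ▸ hhmem)) (hhle _ hm_in)
  have hmax : (r0 :: rest).foldl (fun m r => if f r > m then f r else m) (f r0)
      = col.getLast hcne :=
    le_antisymm (hlge _ hM_in) (hM_all _ (hxs ▸ hlmem))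
  have hget0 : (PySem.List.pyGet? col 0).getD 0 = h0 := by
    rw [hcons, PySem.List.pyGet?_zero_cons]; rfl
  have hgetn : (PySem.List.pyGet? col (-1)).getD 0 = col.getLast hcne := by
    rw [PySem.List.pyGet?_neg_one, List.getLast?_eq_getLast_of_ne_nil hcne]; rfl
  rw [hfirst, hget0, hgetn, Prod.mk.injEq]
  exact ⟨hmin, hmax⟩
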